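-- pv_equiv track=rewrite | github.com/Papr-ai/memory-opensource | cloud_plugins/temporal/activities/document_activities.py | extract_document_title
-- ===== SOURCE A (Python) =====
-- def extract_document_title(first_page_content: str) -> str:
--     """Extract a meaningful title from document content"""
--     lines = first_page_content.strip().split('\n')
--
--     # Look for title-like content in first few lines
--     for line in lines[:5]:
--         line = line.strip()
--         if len(line) > 10 and len(line) < 100:
--             # Check if it looks like a title (not too long, has meaningful words)
--             words = line.split()
--             if len(words) >= 2 and len(words) <= 12:
--                 return line
--
--     # Fallback to first non-empty line
--     for line in lines:
--         line = line.strip()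
--         if line and len(line) > 5:
--             return line[:80] + ("..." if len(line) > 80 else "")
--
--     return "Document Upload"
-- ===== SOURCE B (Python) =====
-- def extract_document_title(first_page_content: str) -> str:
--     """Single pass: test title candidates while idx < 5, remember the first long line as fallback."""
--     fallback = None
--     for idx, raw in enumerate(first_page_content.strip().split('\n')):
--         line = raw.strip()
--         if idx < 5 and 10 < len(line) < 100 and 2 <= len(line.split()) <= 12:
--             return line
--         if fallback is None and len(line) > 5:
--             fallback = line
--     if fallback is None:
--         return "Document Upload"
--     return fallback[:80] + ("..." if len(fallback) > 80 else "")
-- ===== Notes on version B (the rewrite author's own statement) =====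
-- stated objective: simpler
-- what changed: A's two sequential scans (title scan over the first 5 lines, then a full fallback scan) are fused into one pass that tests titles while the index is below 5 and remembers the first >5-char stripped line as a fallback candidate, truncated only after the loop.
import Mathlib
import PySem

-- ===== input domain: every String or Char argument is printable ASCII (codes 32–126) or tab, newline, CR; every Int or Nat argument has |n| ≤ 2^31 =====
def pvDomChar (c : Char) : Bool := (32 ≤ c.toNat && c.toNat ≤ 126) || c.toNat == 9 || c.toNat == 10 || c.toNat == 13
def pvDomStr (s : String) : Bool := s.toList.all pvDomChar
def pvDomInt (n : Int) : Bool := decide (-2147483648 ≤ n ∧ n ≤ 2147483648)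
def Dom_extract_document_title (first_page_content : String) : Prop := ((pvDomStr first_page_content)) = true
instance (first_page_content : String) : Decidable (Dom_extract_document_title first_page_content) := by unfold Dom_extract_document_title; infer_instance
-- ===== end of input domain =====

-- B folds A's two sequential scans into one pass that remembers a fallback candidate (objective: simpler decomposition, same cost).

-- line[:80] + ("..." if len(line) > 80 else "") — shared by both ports (identical expression in Source A and Source B)
def pvTrunc (line : List Char) : List Char :=
  PySem.List.slice line none (some 80) ++ (if 80 < line.length then "...".toList else [])

-- ===== PORT A =====
-- first loop of A: over lines[:5], return the first stripped line passing the title test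
def pvScanTitleA : List (List Char) → Option (List Char)
  | [] => none
  | l :: ls =>
    let line := PySem.Chars.strip l
    if 10 < line.length ∧ line.length < 100 then
      let words := PySem.Chars.split₀ line
      if 2 ≤ words.length ∧ words.length ≤ 12 then some line else pvScanTitleA ls
    else pvScanTitleA ls

-- second loop of A: first non-empty stripped line longer than 5, truncated
def pvScanFallbackA : List (List Char) → Option (List Char)
  | [] => none
  | l :: ls =>
    let line := PySem.Chars.strip l
    if line ≠ [] ∧ 5 < line.length then some (pvTrunc line) else pvScanFallbackA ls

def extract_document_title (first_page_content : String) : String :=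
  let lines := PySem.Chars.splitOn (PySem.Chars.strip first_page_content.toList) ['\n']
  match pvScanTitleA (PySem.List.slice lines none (some 5)) with
  | some t => String.ofList t
  | none =>
    match pvScanFallbackA lines with
    | some r => String.ofList r
    | none => String.ofList "Document Upload".toList

-- ===== PORT B =====
-- Source B's single enumerate loop: idx counts lines, fb is the remembered fallback candidate
def pvScanB : List (List Char) → Nat → Option (List Char) → List Char
  | [], _, fb =>
    match fb with
    | none => "Document Upload".toList
    | some f => pvTrunc f
  | raw :: ls, idx, fb =>
    let line := PySem.Chars.strip raw
    if idx < 5 ∧ 10 < line.length ∧ line.length < 100 ∧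
        2 ≤ (PySem.Chars.split₀ line).length ∧ (PySem.Chars.split₀ line).length ≤ 12 then
      line
    else
      pvScanB ls (idx + 1) (if fb = none ∧ 5 < line.length then some line else fb)

def extract_document_title_alt (first_page_content : String) : String :=
  String.ofList
    (pvScanB (PySem.Chars.splitOn (PySem.Chars.strip first_page_content.toList) ['\n']) 0 none)

-- ===== PRECONDITION & SPEC =====
def Spec_extract_document_title (first_page_content : String) (out : String) : Prop := out = extract_document_title_alt first_page_content
instance (first_page_content : String) (out : String) : Decidable (Spec_extract_document_title first_page_content out) := by unfold Spec_extract_document_title; infer_instance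

-- ===== CLAIM (what is proved, stated in full; the proofs are below) =====
def Claim_equal_extract_document_title : Prop := ∀ (first_page_content : String), Dom_extract_document_title first_page_content → Spec_extract_document_title first_page_content (extract_document_title first_page_content)

-- ===== LEMMAS AND PROOFS =====

-- loop invariant: B's one pass with counter k and candidate fb equals A's title scan on the
-- remaining first-5 window, then fb (already found fallback) or A's fallback scan of the rest
theorem pvScanB_eq (ls : List (List Char)) :
    ∀ (k : Nat) (fb : Option (List Char)), pvScanB ls k fb =
      match pvScanTitleA (ls.take (5 - k)) with
      | some t => t
      | none =>
        match fb with
        | some f => pvTrunc f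
        | none =>
          match pvScanFallbackA ls with
          | some r => r
          | none => "Document Upload".toList := by
  induction ls with
  | nil =>
    intro k fb
    simp [pvScanB, pvScanTitleA, pvScanFallbackA]
    cases fb <;> rfl
  | cons l ls ih =>
    intro k fb
    by_cases hk : k < 5
    · have htake : (l :: ls).take (5 - k) = l :: ls.take (5 - (k + 1)) := by
        have : 5 - k = (5 - (k + 1)) + 1 := by omega
        rw [this]; rfl
      rw [htake]
      by_cases hc : 10 < (PySem.Chars.strip l).length ∧ (PySem.Chars.strip l).length < 100 ∧
          2 ≤ (PySem.Chars.split₀ (PySem.Chars.strip l)).length ∧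
          (PySem.Chars.split₀ (PySem.Chars.strip l)).length ≤ 12
      · simp only [pvScanB, pvScanTitleA]
        rw [if_pos ⟨hk, hc⟩, if_pos ⟨hc.1, hc.2.1⟩, if_pos ⟨hc.2.2.1, hc.2.2.2⟩]
      · simp only [pvScanB]
        rw [if_neg (by tauto), ih]
        have hA : pvScanTitleA (l :: ls.take (5 - (k + 1))) = pvScanTitleA (ls.take (5 - (k + 1))) := by
          simp only [pvScanTitleA]
          by_cases h1 : 10 < (PySem.Chars.strip l).length ∧ (PySem.Chars.strip l).length < 100
          · rw [if_pos h1, if_neg (by tauto)]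
          · rw [if_neg h1]
        rw [hA]
        cases hT : pvScanTitleA (ls.take (5 - (k + 1)))
        · simp only
          by_cases h5 : 5 < (PySem.Chars.strip l).length
          · have hne : PySem.Chars.strip l ≠ [] := by
              intro h; rw [h] at h5; simp at h5
            cases fb with
            | none =>
              rw [if_pos ⟨rfl, h5⟩]
              simp only [pvScanFallbackA]
              rw [if_pos ⟨hne, h5⟩]
            | some f => rw [if_neg (by simp)]
          · have hfb : (if fb = none ∧ 5 < (PySem.Chars.strip l).length then some (PySem.Chars.strip l) else fb) = fb := by
              rw [if_neg (by tauto)]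
            rw [hfb]
            cases fb with
            | none =>
              simp only [pvScanFallbackA]
              rw [if_neg (by tauto)]
            | some f => rfl
        · rfl
    · have htake : ∀ (xs : List (List Char)) (m : Nat), ¬ m < 5 → xs.take (5 - m) = [] := by
        intro xs m hm
        have : 5 - m = 0 := by omega
        rw [this]; rfl
      rw [htake _ k hk]
      simp only [pvScanB]
      rw [if_neg (by tauto), ih, htake _ (k + 1) (by omega)]
      simp only [pvScanTitleA]
      by_cases h5 : 5 < (PySem.Chars.strip l).length
      · have hne : PySem.Chars.strip l ≠ [] := by
          intro h; rw [h] at h5; simp at h5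
        cases fb with
        | none =>
          rw [if_pos ⟨rfl, h5⟩]
          simp only [pvScanFallbackA]
          rw [if_pos ⟨hne, h5⟩]
        | some f => rw [if_neg (by simp)]
      · rw [if_neg (by tauto)]
        cases fb with
        | none =>
          simp only [pvScanFallbackA]
          rw [if_neg (by tauto)]
        | some f => rfl

-- ===== VERDICT (by name: the statement is the Claim_ definition above) =====
theorem extract_document_title_spec : Claim_equal_extract_document_title := by
  intro s _
  unfold Spec_extract_document_title extract_document_title extract_document_title_alt
  rw [pvScanB_eq]
  have h5 : PySem.List.slice (PySem.Chars.splitOn (PySem.Chars.strip s.toList) ['\n']) none (some 5)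
      = (PySem.Chars.splitOn (PySem.Chars.strip s.toList) ['\n']).take (5 - 0) := by
    have := PySem.List.slice_to_natCast (PySem.Chars.splitOn (PySem.Chars.strip s.toList) ['\n']) 5
    simpa using this
  simp only [h5]
  cases pvScanTitleA ((PySem.Chars.splitOn (PySem.Chars.strip s.toList) ['\n']).take (5 - 0))
  · simp only
    cases pvScanFallbackA (PySem.Chars.splitOn (PySem.Chars.strip s.toList) ['\n']) <;> rfl
  · rfl
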